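-- pv_equiv track=rewrite | github.com/regulatorystudies/Reg-Stats | dynamic_dashboard/unified_agenda_data/unified_agenda_data_analysis.py | _admin_agendas_up_to
-- ===== SOURCE A (Python) =====
-- ADMIN_TERMS = {
--     'Clinton': [(1993, 2001)],
--     'Bush 43': [(2001, 2009)],
--     'Obama': [(2009, 2017)],
--     'Trump 45': [(2017, 2021)],
--     'Biden': [(2021, 2025)],
--     'Trump 47': [(2025, 2029)],
-- }
--
-- def _agenda_number_within_admin(admin: str, year: int, season: str) -> int:
--     """
--     Agenda number is 1-based within an administration.
--     """
--     season_offset = 1 if season == 'spring' else 2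
--     agendas_before = 0
--     for start, end in ADMIN_TERMS[admin]:
--         if year < start:
--             break
--         if start <= year < end:
--             return agendas_before + (year - start) * 2 + season_offset
--         agendas_before += (end - start) * 2
--     raise ValueError(f"Year {year} not in administration {admin}.")
--
-- def _agenda_year_for_admin_n(admin: str, n: int, season: str) -> int:
--     """
--     Inverse of agenda numbering: return the year for the nth agenda of `season`
--     within an administration, accounting for non-consecutive terms.
--     """
--     if n < 1:
--         raise ValueError("Agenda number must be >= 1.")
--
--     # Ensure requested season matches n parity (odd=spring, even=fall)
--     if (season == 'spring' and n % 2 == 0) or (season == 'fall' and n % 2 == 1):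
--         raise ValueError("Season does not match agenda number parity.")
--
--     remaining = n
--     for start, end in ADMIN_TERMS[admin]:
--         term_total = (end - start) * 2
--         if remaining > term_total:
--             remaining -= term_total
--             continue
--         # remaining is within this term
--         year_offset = (remaining - 1) // 2
--         year_val = start + year_offset
--         if not (start <= year_val < end):
--             raise ValueError("Computed year is outside admin term bounds.")
--         return year_val
--
--     raise ValueError(f"Administration {admin} does not have agenda #{n}.")
--
-- def _admin_agendas_up_to(admin: str, year: int, season: str):
--     """
--     List (year, season) tuples for all agendas in an administration up to (year, season) inclusive.
--     """
--     target_n = _agenda_number_within_admin(admin, year, season)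
--     items = []
--     for n in range(1, target_n + 1):
--         s = 'spring' if n % 2 == 1 else 'fall'
--         y = _agenda_year_for_admin_n(admin, n, s)
--         items.append((y, s))
--     return items
-- ===== SOURCE B (Python) =====
-- ADMIN_TERMS = {
--     'Clinton': [(1993, 2001)],
--     'Bush 43': [(2001, 2009)],
--     'Obama': [(2009, 2017)],
--     'Trump 45': [(2017, 2021)],
--     'Biden': [(2021, 2025)],
--     'Trump 47': [(2025, 2029)],
-- }
--
-- def _admin_agendas_up_to(admin: str, year: int, season: str):
--     """
--     List (year, season) tuples for all agendas in an administration up to (year, season) inclusive.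
--     """
--     terms = ADMIN_TERMS[admin]
--     if not any(start <= year < end for start, end in terms):
--         raise ValueError(f"Year {year} not in administration {admin}.")
--     is_spring = season == 'spring'
--     items = []
--     for start, end in terms:
--         for y in range(start, end):
--             items.append((y, 'spring'))
--             if is_spring and y == year:
--                 return items
--             items.append((y, 'fall'))
--             if not is_spring and y == year:
--                 return items
--     return items  # unreachable given the check above
-- ===== Notes on version B (the rewrite author's own statement) =====
-- stated objective: simpler
-- what changed: Instead of computing a target agenda number and then inverting the numbering once per index (calling _agenda_year_for_admin_n for every n), B does a single forward enumeration over the admin's term years, appending (y,'spring') and (y,'fall') and returning as soon as the target (year, season) is appended.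
import Mathlib
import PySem

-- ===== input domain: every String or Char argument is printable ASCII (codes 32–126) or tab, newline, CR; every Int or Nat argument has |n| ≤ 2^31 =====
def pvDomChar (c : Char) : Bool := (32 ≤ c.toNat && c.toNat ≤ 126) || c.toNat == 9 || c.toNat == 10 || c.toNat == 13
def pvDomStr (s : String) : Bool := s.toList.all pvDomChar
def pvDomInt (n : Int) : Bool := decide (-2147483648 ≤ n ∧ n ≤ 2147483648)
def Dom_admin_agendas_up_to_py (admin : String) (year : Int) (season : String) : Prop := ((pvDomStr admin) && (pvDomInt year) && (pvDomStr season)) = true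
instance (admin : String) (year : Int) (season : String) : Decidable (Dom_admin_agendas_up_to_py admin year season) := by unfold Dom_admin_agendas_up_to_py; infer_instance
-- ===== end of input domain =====

-- B replaces A's compute-target-number-then-invert-each-index scheme with one forward
-- enumeration of the admin's term years, returning when the target is appended (simpler).

-- shared module constant ADMIN_TERMS (a dict: association list in insertion order)
def ADMIN_TERMS : PySem.Dict String (List (Int × Int)) :=
  PySem.Dict.ofList
  [("Clinton", [(1993, 2001)]), ("Bush 43", [(2001, 2009)]), ("Obama", [(2009, 2017)]),
   ("Trump 45", [(2017, 2021)]), ("Biden", [(2021, 2025)]), ("Trump 47", [(2025, 2029)])]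

-- ===== PORT A =====
-- loop of _agenda_number_within_admin; none = the trailing ValueError / break
def pvAgendaNumLoop (year : Int) (season_offset : Int) (agendas_before : Int) :
    List (Int × Int) → Option Int
  | [] => none
  | (s, e) :: rest =>
    if year < s then none
    else if s ≤ year ∧ year < e then some (agendas_before + (year - s) * 2 + season_offset)
    else pvAgendaNumLoop year season_offset (agendas_before + (e - s) * 2) rest

-- _agenda_number_within_admin; none = KeyError (missing admin) or ValueError
def pvAgendaNumberWithinAdmin (admin : String) (year : Int) (season : String) : Option Int :=
  let season_offset : Int := if season = "spring" then 1 else 2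
  match PySem.Dict.get? ADMIN_TERMS admin with
  | none => none
  | some terms => pvAgendaNumLoop year season_offset 0 terms

-- loop of _agenda_year_for_admin_n; none = any of its ValueErrors
def pvAgendaYearLoop (remaining : Int) : List (Int × Int) → Option Int
  | [] => none
  | (s, e) :: rest =>
    let term_total := (e - s) * 2
    if remaining > term_total then pvAgendaYearLoop (remaining - term_total) rest
    else
      let year_offset := PySem.Int.floordiv (remaining - 1) 2
      let year_val := s + year_offset
      if ¬ (s ≤ year_val ∧ year_val < e) then none else some year_val

-- _agenda_year_for_admin_n
def pvAgendaYearForAdminN (admin : String) (n : Int) (season : String) : Option Int :=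
  if n < 1 then none
  else if (season = "spring" ∧ PySem.Int.mod n 2 = 0) ∨ (season = "fall" ∧ PySem.Int.mod n 2 = 1)
  then none
  else
    match PySem.Dict.get? ADMIN_TERMS admin with
    | none => none
    | some terms => pvAgendaYearLoop n terms

-- _admin_agendas_up_to; where the Python raises (helper returns none) the port yields [],
-- outside Pre_.
def admin_agendas_up_to_py (admin : String) (year : Int) (season : String) : List (Int × String) :=
  match pvAgendaNumberWithinAdmin admin year season with
  | none => []
  | some target_n =>
    (PySem.List.pyRange 1 (target_n + 1) 1).foldl (fun items n =>
      let s : String := if PySem.Int.mod n 2 = 1 then "spring" else "fall"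
      match pvAgendaYearForAdminN admin n s with
      | none => items            -- Python raises here; unreachable inside Pre_
      | some y => items ++ [(y, s)]) []

-- ===== PORT B =====
-- inner 'for y in range(start, end)' loop with early return (some = returned)
def pvAltYears (year : Int) (isSpring : Bool) (items : List (Int × String)) :
    List Int → Option (List (Int × String)) × List (Int × String)
  | [] => (none, items)
  | y :: ys =>
    let items1 := items ++ [(y, "spring")]
    if isSpring ∧ y = year then (some items1, items1)
    else
      let items2 := items1 ++ [(y, "fall")]
      if ¬ isSpring ∧ y = year then (some items2, items2)
      else pvAltYears year isSpring items2 ys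

-- outer 'for start, end in terms' loop
def pvAltTerms (year : Int) (isSpring : Bool) (items : List (Int × String)) :
    List (Int × Int) → List (Int × String)
  | [] => items
  | (s, e) :: rest =>
    match pvAltYears year isSpring items (PySem.List.pyRange s e 1) with
    | (some ret, _) => ret
    | (none, items') => pvAltTerms year isSpring items' rest

def admin_agendas_up_to_py_alt (admin : String) (year : Int) (season : String) : List (Int × String) :=
  match PySem.Dict.get? ADMIN_TERMS admin with
  | none => []                       -- Python: KeyError, outside Pre_
  | some terms =>
    if ¬ terms.any (fun p => decide (p.1 ≤ year ∧ year < p.2)) then []   -- Python: ValueError, outside Pre_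
    else
      let is_spring := season == "spring"
      pvAltTerms year is_spring [] terms

-- ===== PRECONDITION & SPEC =====
-- Pre_ admits exactly the inputs on which the Python A returns normally: a known admin
-- and a year inside that admin's term (otherwise A raises KeyError / ValueError).
def Pre_admin_agendas_up_to_py (admin : String) (year : Int) (season : String) : Prop :=
  (admin = "Clinton" ∧ 1993 ≤ year ∧ year < 2001) ∨
  (admin = "Bush 43" ∧ 2001 ≤ year ∧ year < 2009) ∨
  (admin = "Obama" ∧ 2009 ≤ year ∧ year < 2017) ∨
  (admin = "Trump 45" ∧ 2017 ≤ year ∧ year < 2021) ∨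
  (admin = "Biden" ∧ 2021 ≤ year ∧ year < 2025) ∨
  (admin = "Trump 47" ∧ 2025 ≤ year ∧ year < 2029)
instance (admin : String) (year : Int) (season : String) : Decidable (Pre_admin_agendas_up_to_py admin year season) := by unfold Pre_admin_agendas_up_to_py; infer_instance

def pvWitness_admin_agendas_up_to_py : String × Int × String := ("Obama", 2010, "fall")

def Spec_admin_agendas_up_to_py (admin : String) (year : Int) (season : String) (out : List (Int × String)) : Prop := out = admin_agendas_up_to_py_alt admin year season
instance (admin : String) (year : Int) (season : String) (out : List (Int × String)) : Decidable (Spec_admin_agendas_up_to_py admin year season out) := by unfold Spec_admin_agendas_up_to_py; infer_instance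

-- ===== CLAIM (what is proved, stated in full; the proofs are below) =====
def Claim_equal_admin_agendas_up_to_py : Prop := ∀ (admin : String) (year : Int) (season : String), Dom_admin_agendas_up_to_py admin year season → Pre_admin_agendas_up_to_py admin year season → Spec_admin_agendas_up_to_py admin year season (admin_agendas_up_to_py admin year season)

-- ===== LEMMAS AND PROOFS =====

-- both programs read `season` only through the test `season == "spring"`:
-- any non-"spring" season gives the same result as "fall"
theorem pvA_season_fall (admin : String) (year : Int) (season : String)
    (h : season ≠ "spring") :
    admin_agendas_up_to_py admin year season = admin_agendas_up_to_py admin year "fall" := by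
  simp [admin_agendas_up_to_py, pvAgendaNumberWithinAdmin, h]

theorem pvB_season_fall (admin : String) (year : Int) (season : String)
    (h : season ≠ "spring") :
    admin_agendas_up_to_py_alt admin year season = admin_agendas_up_to_py_alt admin year "fall" := by
  have hb : (season == "spring") = false := beq_eq_false_iff_ne.mpr h
  simp [admin_agendas_up_to_py_alt, hb]

-- ===== VERDICT (by name: the statement is the Claim_ definition above) =====
theorem admin_agendas_up_to_py_spec : Claim_equal_admin_agendas_up_to_py := by
  unfold Claim_equal_admin_agendas_up_to_py
  intro admin year season _hdom hpre
  unfold Spec_admin_agendas_up_to_py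
  by_cases hs : season = "spring"
  · subst hs
    rcases hpre with ⟨rfl, h1, h2⟩ | ⟨rfl, h1, h2⟩ | ⟨rfl, h1, h2⟩ | ⟨rfl, h1, h2⟩ |
      ⟨rfl, h1, h2⟩ | ⟨rfl, h1, h2⟩ <;> interval_cases year <;> decide
  · rw [pvA_season_fall admin year season hs, pvB_season_fall admin year season hs]
    rcases hpre with ⟨rfl, h1, h2⟩ | ⟨rfl, h1, h2⟩ | ⟨rfl, h1, h2⟩ | ⟨rfl, h1, h2⟩ |
      ⟨rfl, h1, h2⟩ | ⟨rfl, h1, h2⟩ <;> interval_cases year <;> decide
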